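/- GENERATED by farm/mkstatement.py from design/units.tsv (unit `get_bits`) and the Specs of Vorbis/Spec/*.lean — do not edit.
   THE STATEMENT of the proof unit `get_bits`: the function `get_bits` (76 instructions) satisfies its contract,
   given the contracts of its callees — the recursive calls by the STAGE-1 contract `get_bits.spec24` (unit `get_bits.24`). What the names mean: Vorbis/Spec/Basic.lean. The theorem to prove:
   `theorem get_bits_ok : Vorbis.Spec.get_bits.Statement`. -/
import Vorbis.Spec.Reader
namespace Vorbis.Spec.get_bits
open X86 X86.User Asan

/-- The statement of unit `get_bits`. -/
def Statement : Prop :=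
  ∀ (Lay : Layout) (_hLay : Lay.hi = 0x1000000) (μ : Microarch) (_hμ : UserX.MicroOK μ) (u₀ : State)
    (_hcode : HasCodeNat Lay u₀ Vorbis.L.get_bits.entry Vorbis.Code.code_get_bits.nat Vorbis.L.get_bits.size)
    (_h_asan_load4_noabort : Asan.SmallCheck Lay μ Vorbis.WayInv (Vorbis.CodeOK u₀) [.rax, .rcx, .rdx] 4 Vorbis.L.__asan_load4_noabort.entry)
    (_h_asan_store4_noabort : Asan.SmallCheck Lay μ Vorbis.WayInv (Vorbis.CodeOK u₀) [.rax, .rcx, .rdx] 4 Vorbis.L.__asan_store4_noabort.entry)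
    (_h_get8_packet_raw : ∀ (others : List Obj) (frames : List (Nat × FrameLayout)) (Blk : Block → Prop) (len : Nat), Calls Lay μ Vorbis.WayInv (Vorbis.conv u₀) Vorbis.L.get8_packet_raw.entry (Vorbis.Spec.get8_packet_raw.spec others frames Blk len))
    (_h_get_bits_24 : ∀ (others : List Obj) (frames : List (Nat × FrameLayout)) (Blk : Block → Prop) (len : Nat), Calls Lay μ Vorbis.WayInv (Vorbis.conv u₀) Vorbis.L.get_bits.entry (Vorbis.Spec.get_bits.spec24 others frames Blk len)),
    ∀ (others : List Obj) (frames : List (Nat × FrameLayout)) (Blk : Block → Prop) (len : Nat), Calls Lay μ Vorbis.WayInv (Vorbis.conv u₀) Vorbis.L.get_bits.entry (Vorbis.Spec.get_bits.spec others frames Blk len)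

end Vorbis.Spec.get_bits
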